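-- pv_equiv track=rewrite | github.com/pypi-data/pypi-mirror-321 | packages/adaux/adaux-5.0.0.tar.gz/adaux-5.0.0/source/adaux/_components/_20_ci.py | _triggers_from_str
-- ===== SOURCE A (Python) =====
-- import typing as tp
--
-- def _triggers_from_str(trigger_str: str) -> tp.Sequence[str]:
--     if trigger_str[0] not in "+-":
--         trigger_str = f"+{trigger_str}"
--
--     triggers = []
--     old = 0
--     for i, char in enumerate(trigger_str):
--         if char in "+-":
--             triggers.append(trigger_str[old:i])
--             old = i
--     triggers.append(trigger_str[old:])
--     waste = triggers.pop(0)
--     assert waste == ""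
--     return triggers
-- ===== SOURCE B (Python) =====
-- import typing as tp
--
-- def _triggers_from_str(trigger_str: str) -> tp.Sequence[str]:
--     if trigger_str[0] not in "+-":
--         trigger_str = f"+{trigger_str}"
--
--     triggers: tp.List[str] = []
--     for char in trigger_str:
--         if char in "+-":
--             triggers.append(char)
--         else:
--             triggers[-1] += char  # safe: first char is a sign, so triggers is non-empty
--     return triggers
-- ===== Notes on version B (the rewrite author's own statement) =====
-- stated objective: simpler
-- what changed: Tokens are built by accumulation (start a new one-char token at each sign, append other characters onto the last token) instead of tracking a start index and slicing, which removes the trailing slice, the pop(0) and the assert.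
import Mathlib
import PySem

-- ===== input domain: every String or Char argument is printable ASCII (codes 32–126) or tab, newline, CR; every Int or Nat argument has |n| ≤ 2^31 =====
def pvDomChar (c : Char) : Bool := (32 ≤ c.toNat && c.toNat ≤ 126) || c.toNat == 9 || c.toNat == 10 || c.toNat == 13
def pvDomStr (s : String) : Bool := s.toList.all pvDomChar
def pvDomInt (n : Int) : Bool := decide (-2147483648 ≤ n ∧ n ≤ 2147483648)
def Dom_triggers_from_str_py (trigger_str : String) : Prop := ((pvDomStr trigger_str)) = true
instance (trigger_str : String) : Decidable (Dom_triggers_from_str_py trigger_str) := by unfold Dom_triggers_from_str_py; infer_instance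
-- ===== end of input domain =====

-- B builds the tokens by accumulation (new one-char token at each sign, other chars appended
-- onto the last token) instead of A's start-index tracking + slicing + pop(0)/assert: simpler.


-- ===== PORT A =====
-- 'if trigger_str[0] not in "+-": trigger_str = f"+{trigger_str}"' — shared by both Pythons.
-- trigger_str[0] raises IndexError on the empty string: excluded by Pre_ (the 'none' arm is unreachable there).
def pvGuard (cs0 : List Char) : List Char :=
  match PySem.List.pyGet? cs0 0 with
  | some c => if c = '+' ∨ c = '-' then cs0 else '+' :: cs0
  | none => cs0

-- loop body: 'if char in "+-": triggers.append(trigger_str[old:i]); old = i'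
def pvABody (cs : List Char) (acc : List (List Char) × Int) (p : Int × Char) :
    List (List Char) × Int :=
  if p.2 = '+' ∨ p.2 = '-' then
    (acc.1 ++ [PySem.List.slice cs (some acc.2) (some p.1)], p.1)
  else acc

def triggers_from_str_py (trigger_str : String) : List String :=
  let cs := pvGuard trigger_str.toList
  let st := (PySem.List.enumerate cs 0).foldl (pvABody cs) ([], 0)
  let triggers := st.1 ++ [PySem.List.slice cs (some st.2) none]
  -- 'waste = triggers.pop(0); assert waste == ""': under Pre_ the first char of cs is a sign,
  -- so the popped head is always "" and pop(0)/assert just drop it.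
  (triggers.drop 1).map String.ofList

-- ===== PORT B =====
-- per-character step: new one-char token at a sign, else 'triggers[-1] += char'
-- (acc is non-empty in the else branch, since the first char is a sign).
def pvBStep (acc : List (List Char)) (c : Char) : List (List Char) :=
  if c = '+' ∨ c = '-' then acc ++ [[c]]
  else acc.dropLast ++ [acc.getLastD [] ++ [c]]

def triggers_from_str_py_alt (trigger_str : String) : List String :=
  let cs := pvGuard trigger_str.toList
  (cs.foldl pvBStep []).map String.ofList

-- ===== PRECONDITION & SPEC =====
-- Pre_: the empty string is excluded — Python A (and B) raise IndexError on trigger_str[0].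
def Pre_triggers_from_str_py (trigger_str : String) : Prop := trigger_str.toList ≠ []
instance (trigger_str : String) : Decidable (Pre_triggers_from_str_py trigger_str) := by
  unfold Pre_triggers_from_str_py; infer_instance

def pvWitness_triggers_from_str_py : String := "+a-b"

def Spec_triggers_from_str_py (trigger_str : String) (out : List String) : Prop :=
  out = triggers_from_str_py_alt trigger_str
instance (trigger_str : String) (out : List String) :
    Decidable (Spec_triggers_from_str_py trigger_str out) := by
  unfold Spec_triggers_from_str_py; infer_instance

-- ===== CLAIM (what is proved, stated in full; the proofs are below) =====
def Claim_equal_triggers_from_str_py : Prop :=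
  ∀ (trigger_str : String), Dom_triggers_from_str_py trigger_str →
    Pre_triggers_from_str_py trigger_str →
    Spec_triggers_from_str_py trigger_str (triggers_from_str_py trigger_str)

-- ===== LEMMAS AND PROOFS =====

-- a prefix-closed slice grows by the character at its right end
lemma pvSliceSnoc (cs : List Char) (old k : Nat) (c : Char) (t : List Char)
    (hok : old ≤ k) (hd : cs.drop k = c :: t) :
    PySem.List.slice cs (some (old:Int)) (some ((k:Int)+1))
      = PySem.List.slice cs (some (old:Int)) (some (k:Int)) ++ [c] := by
  have h1 : ((k:Int)+1) = (((k+1:Nat)):Int) := by push_cast; ring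
  rw [h1, PySem.List.slice_natCast, PySem.List.slice_natCast]
  have h2 : (cs.drop old).drop (k - old) = cs.drop k := by
    rw [List.drop_drop]; congr 1; omega
  have hdo : cs.drop old = (cs.drop old).take (k - old) ++ c :: t := by
    conv_lhs => rw [← List.take_append_drop (k - old) (cs.drop old)]
    rw [h2, hd]
  have hk : k < cs.length := by
    by_contra h
    simp [List.drop_eq_nil_of_le (le_of_not_gt h)] at hd
  have hlen : ((cs.drop old).take (k - old)).length = k - old := by
    simp; omega
  set P := (cs.drop old).take (k - old) with hP
  rw [hdo]
  rw [show k + 1 - old = P.length + 1 from by omega, List.take_length_add_append]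
  simp

-- main loop invariant: A's (acc, old) state and B's accumulated tokens stay in lockstep
lemma pvLoopRel (cs : List Char) :
    ∀ (l : List Char) (k old : Nat) (accA accB : List (List Char)),
      cs.drop k = l → old ≤ k →
      accA ++ [PySem.List.slice cs (some (old:Int)) (some (k:Int))] = [] :: accB →
      accB ≠ [] →
      (((PySem.List.enumerate l (k:Int)).foldl (pvABody cs) (accA, (old:Int))).1
        ++ [PySem.List.slice cs
              (some ((PySem.List.enumerate l (k:Int)).foldl (pvABody cs) (accA, (old:Int))).2)
              none]).drop 1
      = l.foldl pvBStep accB := by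
  intro l
  induction l with
  | nil =>
    intro k old accA accB hd hok hinv _
    have hk : cs.length ≤ k := by
      by_contra h
      rcases List.drop_eq_getElem_cons (l := cs) (lt_of_not_ge h) with he
      rw [hd] at he; exact (List.cons_ne_nil _ _) he.symm
    have hs : PySem.List.slice cs (some (old:Int)) none
        = PySem.List.slice cs (some (old:Int)) (some (k:Int)) := by
      rw [PySem.List.slice_from_natCast, PySem.List.slice_natCast,
          List.take_of_length_le (by simp [List.length_drop]; omega)]
    simp only [PySem.List.enumerate_nil, List.foldl_nil]
    rw [hs, hinv]
    simp
  | cons c t ih =>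
    intro k old accA accB hd hok hinv hne
    have hk : k < cs.length := by
      by_contra h
      simp [List.drop_eq_nil_of_le (le_of_not_gt h)] at hd
    have hd' : cs.drop (k+1) = t := by
      have h2 : (cs.drop k).drop 1 = cs.drop (k+1) := by
        rw [List.drop_drop]
      rw [← h2, hd]; rfl
    rw [PySem.List.enumerate_cons]
    simp only [List.foldl_cons]
    by_cases hc : c = '+' ∨ c = '-'
    · have hA : pvABody cs (accA, (old:Int)) ((k:Int), c)
          = (accA ++ [PySem.List.slice cs (some (old:Int)) (some (k:Int))], (k:Int)) := by
        simp [pvABody, hc]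
      have hB : pvBStep accB c = accB ++ [[c]] := by simp [pvBStep, hc]
      rw [hA, hB]
      have h1 : ((k:Int)+1) = (((k+1:Nat)):Int) := by push_cast; ring
      rw [h1]
      apply ih (k+1) k _ _ hd' (Nat.le_succ k) _ (by simp)
      rw [← h1, pvSliceSnoc cs k k c t (le_refl k) hd]
      have hsk : PySem.List.slice cs (some (k:Int)) (some (k:Int)) = [] := by
        rw [PySem.List.slice_natCast]; simp
      rw [hsk, hinv]
      simp
    · have hA : pvABody cs (accA, (old:Int)) ((k:Int), c) = (accA, (old:Int)) := by
        simp [pvABody, hc]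
      have hB : pvBStep accB c = accB.dropLast ++ [accB.getLastD [] ++ [c]] := by
        simp [pvBStep, hc]
      rw [hA, hB]
      have h1 : ((k:Int)+1) = (((k+1:Nat)):Int) := by push_cast; ring
      rw [h1]
      apply ih (k+1) old _ _ hd' (by omega) _ (by simp)
      rw [← h1, pvSliceSnoc cs old k c t hok hd]
      -- from the invariant: accA = [] :: accB.dropLast and the slice is accB's last token
      rcases List.eq_nil_or_concat accB with h | ⟨bs, b, hb⟩
      · exact absurd h hne
      · subst hb
        have hinv' : accA ++ [PySem.List.slice cs (some (old:Int)) (some (k:Int))]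
            = ([] :: bs) ++ [b] := by simpa using hinv
        rcases List.append_inj' hinv' rfl with ⟨haccA, hS⟩
        simp only [List.cons.injEq, and_true] at hS
        rw [haccA, hS]
        simp

-- the guard always yields a list starting with a sign (on a non-empty input)
lemma pvGuardHead (cs0 : List Char) (h : cs0 ≠ []) :
    ∃ c t, pvGuard cs0 = c :: t ∧ (c = '+' ∨ c = '-') := by
  rcases cs0 with _ | ⟨c, t⟩
  · exact absurd rfl h
  · unfold pvGuard
    simp only [PySem.List.pyGet?]
    by_cases hc : c = '+' ∨ c = '-'
    · exact ⟨c, t, by simp [PySem.List.pyIdx?, hc], hc⟩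
    · exact ⟨'+', c :: t, by simp [PySem.List.pyIdx?, hc], Or.inl rfl⟩

-- ===== VERDICT (by name: the statement is the Claim_ definition above) =====
theorem triggers_from_str_py_spec : Claim_equal_triggers_from_str_py := by
  intro s _ hpre
  simp only [Spec_triggers_from_str_py, triggers_from_str_py, triggers_from_str_py_alt]
  rcases pvGuardHead s.toList hpre with ⟨c, t, hg, hc⟩
  rw [hg]
  congr 1
  rw [PySem.List.enumerate_cons, List.foldl_cons, List.foldl_cons]
  have hA : pvABody (c :: t) (([], 0) : List (List Char) × Int) ((0:Int), c)
      = ([PySem.List.slice (c :: t) (some (0:Int)) (some (0:Int))], (0:Int)) := by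
    simp [pvABody, hc]
  have hB : pvBStep [] c = [[c]] := by simp [pvBStep, hc]
  rw [hA, hB]
  have h0 : PySem.List.slice (c :: t) (some (0:Int)) (some (0:Int)) = [] := by
    have := PySem.List.slice_natCast (xs := c :: t) (a := 0) (b := 0)
    simpa using this
  rw [h0]
  have hinv : ([[]] : List (List Char)) ++
      [PySem.List.slice (c :: t) (some ((0:Nat):Int)) (some ((1:Nat):Int))] = [] :: [[c]] := by
    rw [PySem.List.slice_natCast]; simp
  have := pvLoopRel (c :: t) t 1 0 [[]] [[c]] (by simp) (by omega) hinv (by simp)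
  simpa using this
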